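-- pv_equiv track=rewrite | github.com/ChongWei905/demo-index | DemoIndex/retrieval.py | _count_term_hits
-- ===== SOURCE A (Python) =====
-- def _count_term_hits(text: str, search_terms: list[str]) -> int:
--     """Count unique search-term hits inside one text field."""
--     lowered = str(text or "").casefold()
--     hit_count = 0
--     for term in search_terms:
--         if len(term) < 2:
--             continue
--         if term.casefold() in lowered:
--             hit_count += 1
--     return hit_count
-- ===== SOURCE B (Python) =====
-- def _count_term_hits(text: str, search_terms: list[str]) -> int:
--     """Count unique search-term hits inside one text field.
--
--     Two-phase: build, for each distinct term length, the set of all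
--     substrings of the lowered text of that length, then answer every
--     term by a single hash-set lookup instead of re-scanning the text."""
--     lowered = str(text or "").casefold()
--     n = len(lowered)
--     lengths = {len(t) for t in search_terms if len(t) >= 2}
--     index = {L: {lowered[i:i + L] for i in range(n - L + 1)} for L in lengths}
--     return sum(1 for t in search_terms
--                if len(t) >= 2 and t.casefold() in index[len(t)])
-- ===== Notes on version B (the rewrite author's own statement) =====
-- stated objective: faster
-- what changed: B replaces the per-term substring scan of the text with a two-phase index: it builds, once per distinct term length, the set of all substrings of the lowered text of that length, then answers every term by a single hash-set lookup.
import Mathlib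
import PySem

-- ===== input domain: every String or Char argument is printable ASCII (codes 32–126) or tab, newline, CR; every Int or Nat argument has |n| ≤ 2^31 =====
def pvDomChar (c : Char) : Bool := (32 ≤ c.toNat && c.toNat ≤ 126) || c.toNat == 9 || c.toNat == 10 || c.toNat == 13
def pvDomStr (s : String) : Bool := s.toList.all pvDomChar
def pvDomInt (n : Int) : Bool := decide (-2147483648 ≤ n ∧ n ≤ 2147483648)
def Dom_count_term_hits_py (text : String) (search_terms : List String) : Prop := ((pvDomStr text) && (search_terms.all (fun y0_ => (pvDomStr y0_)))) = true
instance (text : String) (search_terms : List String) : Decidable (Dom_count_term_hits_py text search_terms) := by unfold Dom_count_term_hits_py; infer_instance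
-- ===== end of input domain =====

-- B indexes the text once per distinct term length (a set of all substrings of that length) and answers each term by one set lookup, instead of re-scanning the text for every term; equivalence proved on the ASCII domain, where casefold = lower.


-- ===== PORT A =====
def count_term_hits_py (text : String) (search_terms : List String) : Int :=
  -- str(text or "") is text itself for a str argument ("" or "" == ""); .casefold() is
  -- PySem.Chars.lower, exact on the stated printable-ASCII domain
  let lowered := PySem.Chars.lower text.toList
  search_terms.foldl
    (fun hit_count term =>
      if term.toList.length < 2 then hit_count
      else if PySem.Chars.isIn (PySem.Chars.lower term.toList) lowered then hit_count + 1
      else hit_count) 0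

-- ===== PORT B =====
-- {lowered[i:i+L] for i in range(n - L + 1)} : the set of all length-L substrings of lowered
def pvSubstrSet (lowered : List Char) (L : Nat) : PySem.Set (List Char) :=
  PySem.Set.ofList ((PySem.List.pyRange 0 ((lowered.length : Int) - (L : Int) + 1) 1).map
    (fun i => PySem.List.slice lowered (some i) (some (i + (L : Int)))))

def count_term_hits_py_alt (text : String) (search_terms : List String) : Int :=
  let lowered := PySem.Chars.lower text.toList  -- casefold, exact on the ASCII domain
  -- lengths = {len(t) for t in search_terms if len(t) >= 2}
  let lengths : PySem.Set Nat :=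
    PySem.Set.ofList ((search_terms.filter (fun t => 2 ≤ t.toList.length)).map
      (fun t => t.toList.length))
  -- index = {L: {lowered[i:i+L] for i in range(n - L + 1)} for L in lengths}
  let index : PySem.Dict Nat (PySem.Set (List Char)) :=
    lengths.foldl (fun d L => d.insert L (pvSubstrSet lowered L)) PySem.Dict.empty
  -- sum(1 for t in search_terms if len(t) >= 2 and t.casefold() in index[len(t)])
  search_terms.foldl
    (fun acc t =>
      if 2 ≤ t.toList.length &&
          PySem.Set.contains (index.getD t.toList.length PySem.Set.empty)
            (PySem.Chars.lower t.toList) then  -- index[len(t)]: the key is present under the guard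
        acc + 1
      else acc) 0

-- ===== PRECONDITION & SPEC =====
def Spec_count_term_hits_py (text : String) (search_terms : List String) (out : Int) : Prop := out = count_term_hits_py_alt text search_terms
instance (text : String) (search_terms : List String) (out : Int) : Decidable (Spec_count_term_hits_py text search_terms out) := by unfold Spec_count_term_hits_py; infer_instance

-- ===== CLAIM (what is proved, stated in full; the proofs are below) =====
def Claim_equal_count_term_hits_py : Prop := ∀ (text : String) (search_terms : List String), Dom_count_term_hits_py text search_terms → Spec_count_term_hits_py text search_terms (count_term_hits_py text search_terms)

-- ===== LEMMAS AND PROOFS =====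

-- membership in the length-|sub| substring set is exactly Python's 'sub in cs'
theorem pv_contains_substrSet (cs sub : List Char) :
    PySem.Set.contains (pvSubstrSet cs sub.length) sub = PySem.Chars.isIn sub cs := by
  rw [Bool.eq_iff_iff, PySem.Set.contains_iff, ← PySem.Chars.exists_prefix_drop_iff_isIn]
  unfold pvSubstrSet
  rw [PySem.Set.mem_ofList, List.mem_map]
  constructor
  · rintro ⟨i, hi, hs⟩
    rw [PySem.List.mem_pyRange_one] at hi
    obtain ⟨h0, _⟩ := hi
    rw [PySem.List.slice_toNat _ h0 (by omega)] at hs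
    refine ⟨i.toNat, ?_⟩
    rw [List.prefix_iff_eq_take]
    have : (i + (sub.length : Int)).toNat - i.toNat = sub.length := by omega
    rw [this] at hs
    exact hs.symm
  · rintro ⟨j, hp⟩
    have hl : sub.length ≤ cs.length - j := by
      have := hp.length_le
      simpa using this
    have hs := List.prefix_iff_eq_take.mp hp
    by_cases hj : j ≤ cs.length
    · refine ⟨(j : Int), ?_, ?_⟩
      · rw [PySem.List.mem_pyRange_one]
        constructor
        · positivity
        · have : j + sub.length ≤ cs.length := by omega
          omega
      · rw [PySem.List.slice_toNat _ (by positivity) (by positivity)]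
        have h2 : ((j:Int) + (sub.length : Int)).toNat - ((j:Int)).toNat = sub.length := by omega
        simp only [Int.toNat_natCast] at h2 ⊢
        rw [h2]
        exact hs.symm
    · -- j past the end: drop j = [], so sub = []; index 0 works
      have hnil : cs.drop j = [] := by
        apply List.drop_eq_nil_of_le; omega
      rw [hnil] at hp
      have hsub : sub = [] := List.prefix_nil.mp hp
      refine ⟨(0 : Int), ?_, ?_⟩
      · rw [PySem.List.mem_pyRange_one]
        subst hsub
        refine ⟨le_refl 0, by simp⟩
      · rw [PySem.List.slice_toNat _ (le_refl 0) (by positivity)]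
        subst hsub
        simp

theorem pv_length_lower (cs : List Char) : (PySem.Chars.lower cs).length = cs.length := by
  simp [PySem.Chars.lower]

-- a fold inserting key-determined values: lookup after the loop
theorem pv_get_insert_fold {f : Nat → PySem.Set (List Char)}
    (ls : List Nat) (d : PySem.Dict Nat (PySem.Set (List Char))) (k : Nat) :
    (ls.foldl (fun d L => d.insert L (f L)) d).get? k =
      if k ∈ ls then some (f k) else d.get? k := by
  induction ls generalizing d with
  | nil => simp
  | cons a ls ih =>
    simp only [List.foldl_cons, ih, List.mem_cons]
    by_cases hk : k ∈ ls
    · simp [hk]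
    · by_cases ha : k = a
      · subst ha; simp [hk, PySem.Dict.get?_insert_self]
      · rw [if_neg hk, PySem.Dict.get?_insert_of_ne _ _ ha]
        simp [hk, ha]

-- ===== VERDICT (by name: the statement is the Claim_ definition above) =====
theorem count_term_hits_py_spec : Claim_equal_count_term_hits_py := by
  intro text search_terms _
  unfold Spec_count_term_hits_py count_term_hits_py count_term_hits_py_alt
  apply PySem.List.foldl_congr_mem
  intro acc t ht
  by_cases hlen : t.toList.length < 2
  · rw [if_pos hlen, if_neg ?_]
    intro h
    simp only [Bool.and_eq_true, decide_eq_true_eq] at h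
    omega
  · rw [if_neg hlen]
    have hmem : t.toList.length ∈
        PySem.Set.ofList ((search_terms.filter (fun t => 2 ≤ t.toList.length)).map
          (fun t => t.toList.length)) := by
      rw [PySem.Set.mem_ofList, List.mem_map]
      exact ⟨t, List.mem_filter.mpr ⟨ht, by simp only [decide_eq_true_eq]; omega⟩, rfl⟩
    rw [PySem.Dict.getD_eq_get?_getD, pv_get_insert_fold, if_pos hmem]
    have hcnt : PySem.Set.contains (pvSubstrSet (PySem.Chars.lower text.toList) t.toList.length)
        (PySem.Chars.lower t.toList) =
        PySem.Chars.isIn (PySem.Chars.lower t.toList) (PySem.Chars.lower text.toList) := by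
      have := pv_contains_substrSet (PySem.Chars.lower text.toList) (PySem.Chars.lower t.toList)
      rwa [pv_length_lower] at this
    have h2 : decide (2 ≤ t.toList.length) = true := by
      simp only [decide_eq_true_eq]; omega
    simp only [Option.getD_some, hcnt, h2, Bool.true_and]
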